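-- pv_equiv track=rewrite | github.com/MolSSI/QCEngine | qcengine/programs/tests/standard_suite_contracts.py | contractual_lccd
-- ===== SOURCE A (Python) =====
-- from typing import Any, Tuple
--
-- _contractual_docstring = """
--     Parameters
--     ----------
--     qc_module
--         The program or subprogram running the job (e.g., "cfour" or "cfour-ecc").
--     driver
--         {"energy", "gradient", "hessian"}
--         The derivative level that should be expected.
--     reference
--         {"rhf", "uhf", "rohf"}
--         The SCF reference since programs often output differently based on it.
--     method
--         The target AtomicInput.model.method since "free" methods may not always be
--         output (e.g., MP2 available when target is MP2 but not when target is CCSD).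
--     corl_type
--         {"conv", "df", "cd"}
--         The algorithm for the target method since programs often output differently
--         based on it.
--     fcae
--         {"ae", "fc"}
--         The all-electron vs. frozen-orbital aspect.
--
--     Returns
--     -------
--     (rpv, pv, expected)
--         Of all the QCVariables `pv` that should be available, returns tuple of
--         whether `expected` and what key `rpv` in the reference `pv` should match.
--
-- """
--
-- def contractual_lccd(
--     qc_module: str, driver: str, reference: str, method: str, corl_type: str, fcae: str, sdsc: str
-- ) -> Tuple[str, str, bool]:
--     f"""Of the list of QCVariables an ideal LCCD should produce, returns whether or
--     not each is expected, given the calculation circumstances (like QC program).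
--
--     {_contractual_docstring}
--     """
--     contractual_qcvars = [
--         "HF TOTAL ENERGY",
--         "LCCD CORRELATION ENERGY",
--         "LCCD TOTAL ENERGY",
--         "LCCD SAME-SPIN CORRELATION ENERGY",
--         "LCCD SINGLES ENERGY",
--         "LCCD DOUBLES ENERGY",
--         "LCCD OPPOSITE-SPIN CORRELATION ENERGY",
--     ]
--     if driver == "gradient" and method == "lccd":
--         contractual_qcvars.append("LCCD TOTAL GRADIENT")
--     elif driver == "hessian" and method == "lccd":
--         # contractual_qcvars.append("LCCD TOTAL GRADIENT")
--         contractual_qcvars.append("LCCD TOTAL HESSIAN")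
--
--     for pv in contractual_qcvars:
--         expected = True
--         if (
--             (
--                 (
--                     (qc_module == "psi4-occ" and reference == "rhf" and corl_type in ["df", "cd"] and method == "lccd")
--                     or (qc_module == "cfour-ncc" and reference in ["rhf"] and method == "lccd")
--                     or (qc_module == "nwchem-tce" and reference in ["rhf", "uhf"] and method == "lccd")
--                     or (qc_module == "gamess" and reference in ["rhf"] and method == "lccd")
--                 )
--                 and pv in ["LCCD SAME-SPIN CORRELATION ENERGY", "LCCD OPPOSITE-SPIN CORRELATION ENERGY"]
--             )
--             or (
--                 (qc_module == "nwchem-tce" and reference in ["rohf"] and method in ["lccd"])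
--                 and pv
--                 in [
--                     "LCCD SAME-SPIN CORRELATION ENERGY",
--                     "LCCD OPPOSITE-SPIN CORRELATION ENERGY",
--                     "LCCD SINGLES ENERGY",
--                     "LCCD DOUBLES ENERGY",
--                 ]
--             )
--             or (
--                 (
--                     qc_module == "psi4-occ"
--                     and reference in ["rhf", "uhf", "rohf"]
--                     and corl_type in ["conv", "df", "cd"]
--                     and method == "olccd"
--                 )
--                 and pv
--                 in [
--                     "LCCD CORRELATION ENERGY",
--                     "LCCD TOTAL ENERGY",
--                     "LCCD SAME-SPIN CORRELATION ENERGY",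
--                     "LCCD SINGLES ENERGY",
--                     "LCCD DOUBLES ENERGY",
--                     "LCCD OPPOSITE-SPIN CORRELATION ENERGY",
--                 ]
--             )
--         ):
--             expected = False
--
--         yield (pv, pv, expected)
-- ===== SOURCE B (Python) =====
-- def _rank(pv):
--     # specificity rank of a QCVariable: higher = disabled by weaker rules
--     if pv in ("LCCD SAME-SPIN CORRELATION ENERGY", "LCCD OPPOSITE-SPIN CORRELATION ENERGY"):
--         return 3
--     if pv in ("LCCD SINGLES ENERGY", "LCCD DOUBLES ENERGY"):
--         return 2
--     if pv in ("LCCD CORRELATION ENERGY", "LCCD TOTAL ENERGY"):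
--         return 1
--     return 0
--
--
-- def contractual_lccd(qc_module, driver, reference, method, corl_type, fcae, sdsc):
--     # The three disable rules are nested by strength, so a single cutoff level suffices:
--     # everything of rank >= cut is unexpected.
--     if (
--         qc_module == "psi4-occ"
--         and reference in ("rhf", "uhf", "rohf")
--         and corl_type in ("conv", "df", "cd")
--         and method == "olccd"
--     ):
--         cut = 1
--     elif qc_module == "nwchem-tce" and reference == "rohf" and method == "lccd":
--         cut = 2
--     elif method == "lccd" and (
--         (qc_module == "psi4-occ" and reference == "rhf" and corl_type in ("df", "cd"))
--         or (qc_module in ("cfour-ncc", "gamess") and reference == "rhf")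
--         or (qc_module == "nwchem-tce" and reference in ("rhf", "uhf"))
--     ):
--         cut = 3
--     else:
--         cut = 4
--     names = [
--         "HF TOTAL ENERGY",
--         "LCCD CORRELATION ENERGY",
--         "LCCD TOTAL ENERGY",
--         "LCCD SAME-SPIN CORRELATION ENERGY",
--         "LCCD SINGLES ENERGY",
--         "LCCD DOUBLES ENERGY",
--         "LCCD OPPOSITE-SPIN CORRELATION ENERGY",
--     ]
--     if method == "lccd" and driver == "gradient":
--         names.append("LCCD TOTAL GRADIENT")
--     elif method == "lccd" and driver == "hessian":
--         names.append("LCCD TOTAL HESSIAN")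
--     for pv in names:
--         yield (pv, pv, _rank(pv) < cut)
-- ===== Notes on version B (the rewrite author's own statement) =====
-- stated objective: alternative
-- what changed: B replaces A's per-element disjunction of branch-and-membership tests by a rank/threshold scheme: each QCVariable gets a numeric specificity rank (0..3) and the circumstances determine one cutoff level (the disable rules are nested by strength), so expected is simply rank(pv) < cut.
import Mathlib
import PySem

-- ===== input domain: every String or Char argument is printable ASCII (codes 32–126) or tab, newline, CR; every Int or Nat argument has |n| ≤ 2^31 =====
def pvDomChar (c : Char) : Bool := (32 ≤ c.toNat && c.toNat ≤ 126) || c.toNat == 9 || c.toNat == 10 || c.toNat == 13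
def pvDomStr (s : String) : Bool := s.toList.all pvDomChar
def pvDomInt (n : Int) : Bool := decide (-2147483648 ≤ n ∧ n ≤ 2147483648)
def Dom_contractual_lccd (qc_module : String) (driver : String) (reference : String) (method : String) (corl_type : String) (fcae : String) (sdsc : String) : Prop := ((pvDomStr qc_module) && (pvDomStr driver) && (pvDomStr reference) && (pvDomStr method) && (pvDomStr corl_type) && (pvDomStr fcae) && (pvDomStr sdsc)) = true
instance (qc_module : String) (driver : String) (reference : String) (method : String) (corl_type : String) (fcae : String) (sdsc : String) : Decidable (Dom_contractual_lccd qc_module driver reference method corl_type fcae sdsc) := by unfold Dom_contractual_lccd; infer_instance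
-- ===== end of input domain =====

-- B replaces A's per-element boolean (disjunction of branch conditions and pv-list membership)
-- by a rank/threshold scheme: each QCVariable has a numeric specificity rank and the
-- circumstances determine a single cutoff level (the disable rules are nested by strength);
-- expected = rank(pv) < cut. Same outputs in the same order (objective: alternative).
-- Membership in a literal tuple of strings ('x in ("a","b")') is ported as the corresponding
-- chain of equality tests (exact for Python's 'in' on string literals).

-- ===== PORT A =====
def contractual_lccd (qc_module : String) (driver : String) (reference : String) (method : String) (corl_type : String) (fcae : String) (sdsc : String) : List (String × String × Bool) :=
  let base : List String :=
    ["HF TOTAL ENERGY", "LCCD CORRELATION ENERGY", "LCCD TOTAL ENERGY",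
     "LCCD SAME-SPIN CORRELATION ENERGY", "LCCD SINGLES ENERGY", "LCCD DOUBLES ENERGY",
     "LCCD OPPOSITE-SPIN CORRELATION ENERGY"]
  let contractual_qcvars : List String :=
    if driver == "gradient" && method == "lccd" then base ++ ["LCCD TOTAL GRADIENT"]
    else if driver == "hessian" && method == "lccd" then base ++ ["LCCD TOTAL HESSIAN"]
    else base
  contractual_qcvars.map (fun pv =>
    let expected : Bool :=
      !(((qc_module == "psi4-occ" && reference == "rhf" && (corl_type == "df" || corl_type == "cd") && method == "lccd"
          || qc_module == "cfour-ncc" && reference == "rhf" && method == "lccd"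
          || qc_module == "nwchem-tce" && (reference == "rhf" || reference == "uhf") && method == "lccd"
          || qc_module == "gamess" && reference == "rhf" && method == "lccd")
         && (pv == "LCCD SAME-SPIN CORRELATION ENERGY" || pv == "LCCD OPPOSITE-SPIN CORRELATION ENERGY"))
        || ((qc_module == "nwchem-tce" && reference == "rohf" && method == "lccd")
            && (pv == "LCCD SAME-SPIN CORRELATION ENERGY" || pv == "LCCD OPPOSITE-SPIN CORRELATION ENERGY"
                || pv == "LCCD SINGLES ENERGY" || pv == "LCCD DOUBLES ENERGY"))
        || ((qc_module == "psi4-occ" && (reference == "rhf" || reference == "uhf" || reference == "rohf")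
             && (corl_type == "conv" || corl_type == "df" || corl_type == "cd") && method == "olccd")
            && (pv == "LCCD CORRELATION ENERGY" || pv == "LCCD TOTAL ENERGY"
                || pv == "LCCD SAME-SPIN CORRELATION ENERGY" || pv == "LCCD SINGLES ENERGY"
                || pv == "LCCD DOUBLES ENERGY" || pv == "LCCD OPPOSITE-SPIN CORRELATION ENERGY")))
    (pv, pv, expected))

-- ===== PORT B =====
-- Source B's _rank helper: specificity rank of a QCVariable
def pvRank (pv : String) : Int :=
  if pv == "LCCD SAME-SPIN CORRELATION ENERGY" || pv == "LCCD OPPOSITE-SPIN CORRELATION ENERGY" then 3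
  else if pv == "LCCD SINGLES ENERGY" || pv == "LCCD DOUBLES ENERGY" then 2
  else if pv == "LCCD CORRELATION ENERGY" || pv == "LCCD TOTAL ENERGY" then 1
  else 0

def contractual_lccd_alt (qc_module : String) (driver : String) (reference : String) (method : String) (corl_type : String) (fcae : String) (sdsc : String) : List (String × String × Bool) :=
  let cut : Int :=
    if qc_module == "psi4-occ" && (reference == "rhf" || reference == "uhf" || reference == "rohf")
       && (corl_type == "conv" || corl_type == "df" || corl_type == "cd") && method == "olccd"
    then 1
    else if qc_module == "nwchem-tce" && reference == "rohf" && method == "lccd" then 2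
    else if method == "lccd"
            && (qc_module == "psi4-occ" && reference == "rhf" && (corl_type == "df" || corl_type == "cd")
                || (qc_module == "cfour-ncc" || qc_module == "gamess") && reference == "rhf"
                || qc_module == "nwchem-tce" && (reference == "rhf" || reference == "uhf"))
    then 3
    else 4
  let names : List String :=
    ["HF TOTAL ENERGY", "LCCD CORRELATION ENERGY", "LCCD TOTAL ENERGY",
     "LCCD SAME-SPIN CORRELATION ENERGY", "LCCD SINGLES ENERGY", "LCCD DOUBLES ENERGY",
     "LCCD OPPOSITE-SPIN CORRELATION ENERGY"]
  let names : List String :=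
    if method == "lccd" && driver == "gradient" then names ++ ["LCCD TOTAL GRADIENT"]
    else if method == "lccd" && driver == "hessian" then names ++ ["LCCD TOTAL HESSIAN"]
    else names
  names.map (fun pv => (pv, pv, decide (pvRank pv < cut)))

-- ===== PRECONDITION & SPEC =====
def Spec_contractual_lccd (qc_module : String) (driver : String) (reference : String) (method : String) (corl_type : String) (fcae : String) (sdsc : String) (out : List (String × String × Bool)) : Prop := out = contractual_lccd_alt qc_module driver reference method corl_type fcae sdsc
instance (qc_module : String) (driver : String) (reference : String) (method : String) (corl_type : String) (fcae : String) (sdsc : String) (out : List (String × String × Bool)) : Decidable (Spec_contractual_lccd qc_module driver reference method corl_type fcae sdsc out) := by unfold Spec_contractual_lccd; infer_instance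

-- ===== CLAIM (what is proved, stated in full; the proofs are below) =====
def Claim_equal_contractual_lccd : Prop := ∀ (qc_module : String) (driver : String) (reference : String) (method : String) (corl_type : String) (fcae : String) (sdsc : String), Dom_contractual_lccd qc_module driver reference method corl_type fcae sdsc → Spec_contractual_lccd qc_module driver reference method corl_type fcae sdsc (contractual_lccd qc_module driver reference method corl_type fcae sdsc)

-- ===== LEMMAS AND PROOFS =====

-- A's four-way spin-rule disjunction (method test distributed) equals B's factored form,
-- as an identity of Bool expressions in the atomic tests.
theorem pvCondMerge (a1 a2 a3 a4 r1 r2 c2 c3 m : Bool) :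
    (a1 && r1 && (c2 || c3) && m || a2 && r1 && m || a3 && (r1 || r2) && m || a4 && r1 && m)
    = (m && (a1 && r1 && (c2 || c3) || (a2 || a4) && r1 || a3 && (r1 || r2))) := by
  revert a1 a2 a3 a4 r1 r2 c2 c3 m; decide

-- ===== VERDICT (by name: the statement is the Claim_ definition above) =====
theorem contractual_lccd_spec : Claim_equal_contractual_lccd := by
  intro qm dr rf me ct fc sd _
  show contractual_lccd qm dr rf me ct fc sd = contractual_lccd_alt qm dr rf me ct fc sd
  unfold contractual_lccd contractual_lccd_alt
  rw [pvCondMerge (qm == "psi4-occ") (qm == "cfour-ncc") (qm == "nwchem-tce") (qm == "gamess")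
      (rf == "rhf") (rf == "uhf") (ct == "df") (ct == "cd") (me == "lccd")]
  generalize (qm == "psi4-occ" && rf == "rhf" && (ct == "df" || ct == "cd")
      || (qm == "cfour-ncc" || qm == "gamess") && rf == "rhf"
      || qm == "nwchem-tce" && (rf == "rhf" || rf == "uhf")) = kS
  generalize (qm == "nwchem-tce" && rf == "rohf" && me == "lccd") = k2
  generalize (qm == "psi4-occ" && (rf == "rhf" || rf == "uhf" || rf == "rohf")
      && (ct == "conv" || ct == "df" || ct == "cd") && me == "olccd") = k3
  generalize (me == "lccd") = m1
  generalize (dr == "gradient") = dg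
  generalize (dr == "hessian") = dh
  revert kS k2 k3 m1 dg dh
  decide
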